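-- pv_equiv track=rewrite | github.com/mattdodge/gd | gd/utils.py | get_inclusive_urls
-- ===== SOURCE A (Python) =====
-- def get_inclusive_urls(urls, start, stop):
--     """Yield URLs which are of the range [start, stop]"""
--     in_range = False
--     out_range = False
--     for url in urls:
--         # Check both that a URL contains or is contained within one of
--         # the boundaries. This is necessary as deeper links come.
--         if url in start or start in url:
--             in_range = True
--         if url in stop or stop in url:
--             out_range = True
--         if in_range:
--             yield url
--         if out_range:
--             break
-- ===== SOURCE B (Python) =====
-- def get_inclusive_urls(urls, start, stop):
--     """Yield URLs which are of the range [start, stop] (two-phase search-then-stream)."""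
--     def matches(url, boundary):
--         return url in boundary or boundary in url
--
--     it = iter(urls)
--     # Phase 1: search for the start boundary.
--     for url in it:
--         if matches(url, stop) and not matches(url, start):
--             return  # stop boundary seen before start: nothing to yield
--         if matches(url, start):
--             yield url
--             if matches(url, stop):
--                 return  # start and stop matched on the same url
--             break
--     else:
--         return  # start never found
--     # Phase 2: stream until the stop boundary.
--     for url in it:
--         yield url
--         if matches(url, stop):
--             return
-- ===== Notes on version B (the rewrite author's own statement) =====
-- stated objective: alternative
-- what changed: Replaces A's single pass over sticky in_range/out_range flags with a two-phase state machine over one shared iterator: a search loop that finds the start boundary (returning early if the stop boundary appears first), then a stream loop that yields until the stop boundary.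
import Mathlib
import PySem

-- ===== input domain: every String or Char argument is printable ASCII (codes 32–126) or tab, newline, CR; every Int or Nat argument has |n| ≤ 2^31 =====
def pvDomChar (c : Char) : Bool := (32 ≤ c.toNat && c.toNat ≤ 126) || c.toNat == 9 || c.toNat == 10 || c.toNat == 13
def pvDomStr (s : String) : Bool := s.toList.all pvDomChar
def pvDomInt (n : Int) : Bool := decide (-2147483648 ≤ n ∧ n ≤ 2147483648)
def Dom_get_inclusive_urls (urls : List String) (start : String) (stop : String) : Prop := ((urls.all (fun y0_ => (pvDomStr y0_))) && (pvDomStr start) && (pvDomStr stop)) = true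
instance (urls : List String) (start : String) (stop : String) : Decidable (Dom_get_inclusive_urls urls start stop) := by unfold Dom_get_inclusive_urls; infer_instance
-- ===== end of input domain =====

-- B replaces A's single pass over sticky in_range/out_range flags with a two-phase
-- search-then-stream state machine over the same list (alternative decomposition, same cost).


-- ===== PORT A =====
-- A's single loop: sticky flags in_range/out_range; yield while in_range, break once out_range.
def get_inclusive_urls_loop (start : String) (stop : String) : List String → Bool → Bool → List String
  | [], _, _ => []
  | url :: rest, in_range, out_range =>
    let in_range := in_range || (PySem.Str.isIn url start || PySem.Str.isIn start url)
    let out_range := out_range || (PySem.Str.isIn url stop || PySem.Str.isIn stop url)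
    let ys := if in_range then [url] else []
    if out_range then ys else ys ++ get_inclusive_urls_loop start stop rest in_range out_range

def get_inclusive_urls (urls : List String) (start : String) (stop : String) : List String :=
  get_inclusive_urls_loop start stop urls false false

-- ===== PORT B =====
-- B phase 2: stream each url, stopping after one matching the stop boundary.
def get_inclusive_urls_stream (start : String) (stop : String) : List String → List String
  | [] => []
  | url :: rest =>
    url :: (if PySem.Str.isIn url stop || PySem.Str.isIn stop url then []
            else get_inclusive_urls_stream start stop rest)

-- B phase 1: search for the start boundary, returning early if the stop boundary appears first.
def get_inclusive_urls_search (start : String) (stop : String) : List String → List String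
  | [] => []
  | url :: rest =>
    if (PySem.Str.isIn url stop || PySem.Str.isIn stop url)
        && !(PySem.Str.isIn url start || PySem.Str.isIn start url) then []
    else if PySem.Str.isIn url start || PySem.Str.isIn start url then
      (if PySem.Str.isIn url stop || PySem.Str.isIn stop url then [url]
       else url :: get_inclusive_urls_stream start stop rest)
    else get_inclusive_urls_search start stop rest

def get_inclusive_urls_alt (urls : List String) (start : String) (stop : String) : List String :=
  get_inclusive_urls_search start stop urls

-- ===== PRECONDITION & SPEC =====
def Spec_get_inclusive_urls (urls : List String) (start : String) (stop : String) (out : List String) : Prop := out = get_inclusive_urls_alt urls start stop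
instance (urls : List String) (start : String) (stop : String) (out : List String) : Decidable (Spec_get_inclusive_urls urls start stop out) := by unfold Spec_get_inclusive_urls; infer_instance

-- ===== CLAIM (what is proved, stated in full; the proofs are below) =====
def Claim_equal_get_inclusive_urls : Prop := ∀ (urls : List String) (start : String) (stop : String), Dom_get_inclusive_urls urls start stop → Spec_get_inclusive_urls urls start stop (get_inclusive_urls urls start stop)

-- ===== LEMMAS AND PROOFS =====
-- Once in_range is set, A yields every url and breaks after a stop match: that is B's stream phase.
theorem loop_true_eq_stream (start stop : String) (l : List String) :
    get_inclusive_urls_loop start stop l true false = get_inclusive_urls_stream start stop l := by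
  induction l with
  | nil => rfl
  | cons url rest ih =>
    by_cases h1 : PySem.Chars.isIn url.toList stop.toList = true <;>
    by_cases h2 : PySem.Chars.isIn stop.toList url.toList = true <;>
      simp [get_inclusive_urls_loop, get_inclusive_urls_stream, h1, h2, ih]

-- While in_range is unset, A matches B's search phase.
theorem loop_false_eq_search (start stop : String) (l : List String) :
    get_inclusive_urls_loop start stop l false false = get_inclusive_urls_search start stop l := by
  induction l with
  | nil => rfl
  | cons url rest ih =>
    by_cases hs1 : PySem.Chars.isIn url.toList start.toList = true <;>
    by_cases hs2 : PySem.Chars.isIn start.toList url.toList = true <;>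
    by_cases ho1 : PySem.Chars.isIn url.toList stop.toList = true <;>
    by_cases ho2 : PySem.Chars.isIn stop.toList url.toList = true <;>
      simp [get_inclusive_urls_loop, get_inclusive_urls_search, hs1, hs2, ho1, ho2, ih,
        loop_true_eq_stream]

-- ===== VERDICT (by name: the statement is the Claim_ definition above) =====
theorem get_inclusive_urls_spec : Claim_equal_get_inclusive_urls := by
  intro urls start stop _
  unfold Spec_get_inclusive_urls get_inclusive_urls get_inclusive_urls_alt
  exact loop_false_eq_search start stop urls
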